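-- pv_equiv track=rewrite | github.com/yonghee12/algorithm_study | kakao 2020 intern/3.py | solution
-- ===== SOURCE A (Python) =====
-- from copy import deepcopy
--
-- def get_small_cart(answer, gems):
--     i, j = answer
--     cart_big = gems[i:j + 1]
--     cart_l = len(set(cart_big))
--     start_i = 0
--     for k in range(len(cart_big)):
--         if len(set(cart_big[k:])) == cart_l:
--             start_i = k
--     answer = [i + start_i, j]
--     return answer
--
-- def solution(gems):
--     buylist = {}
--     for gem in gems:
--         if buylist.get(gem) is None:
--             buylist[gem] = 0
--
--     answer = [0, 0]
--     smallest = len(gems)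
--     cart_key = {}
--     start_i = 0
--     matched = []
--     for idx, gem in enumerate(gems):
--         if cart_key.get(gem) is None:
--             cart_key[gem] = 1
--             answer = [answer[0], idx]
--             if len(cart_key) == len(buylist) and answer[1] - answer[0] < smallest:
--                 matched = deepcopy(answer)
--                 smallest = matched[1] - matched[0]
--                 answer = [idx]
--                 cart_key = {}
--         else:
--             answer[1] = idx
--             answer = get_small_cart(answer, gems)
--
--     return list(map(lambda x: x+1, matched))
-- ===== SOURCE B (Python) =====
-- def solution(gems):
--     total = len(set(gems))
--     smallest = len(gems)
--     cart = set()
--     start = 0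
--     matched = []
--     for idx, gem in enumerate(gems):
--         if gem in cart:
--             # greedy left shrink: drop the front while its gem reappears in the window
--             while gems[start] in gems[start + 1: idx + 1]:
--                 start += 1
--         else:
--             cart.add(gem)
--             if len(cart) == total and idx - start < smallest:
--                 matched = [start, idx]
--                 smallest = idx - start
--                 start = idx
--                 cart = set()
--     return [x + 1 for x in matched]
-- ===== Notes on version B (the rewrite author's own statement) =====
-- stated objective: faster
-- what changed: B replaces A's per-repeat quadratic rescan (recomputing len(set(...)) over every suffix of the window slice, plus the dict-of-zeros preamble) with a single sliding-window pass that keeps an integer start pointer and greedily advances it while the front gem reappears in the window, so no set is ever rebuilt over a slice.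
import Mathlib
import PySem

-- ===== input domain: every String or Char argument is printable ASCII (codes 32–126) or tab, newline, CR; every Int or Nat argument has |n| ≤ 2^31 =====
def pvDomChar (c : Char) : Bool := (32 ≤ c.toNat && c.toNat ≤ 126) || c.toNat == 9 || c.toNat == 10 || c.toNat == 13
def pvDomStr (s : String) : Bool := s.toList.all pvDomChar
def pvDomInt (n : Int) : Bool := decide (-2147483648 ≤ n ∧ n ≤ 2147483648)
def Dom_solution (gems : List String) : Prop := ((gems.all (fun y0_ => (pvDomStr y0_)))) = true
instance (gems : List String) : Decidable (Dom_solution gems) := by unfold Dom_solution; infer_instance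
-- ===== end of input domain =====

-- B is a one-pass sliding window with a greedy start pointer instead of A's repeated
-- len(set(...))-over-every-suffix rescan; return values are proved identical on all inputs.

-- ===== PORT A =====

-- 'i, j = answer': answer is always a 2-element list at every call site, so the
-- pyGetD defaults below are never used (Python would raise on a shorter list).
def getSmallCart (answer : List Int) (gems : List String) : List Int :=
  let i := PySem.List.pyGetD answer 0 0
  let j := PySem.List.pyGetD answer 1 0
  let cart_big := PySem.List.slice gems (some i) (some (j + 1))
  let cart_l := (PySem.Set.ofList cart_big).length
  let start_i := (PySem.List.pyRange 0 (cart_big.length : Int) 1).foldl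
      (fun acc k =>
        if (PySem.Set.ofList (PySem.List.slice cart_big (some k) none)).length = cart_l
        then k else acc) 0
  [i + start_i, j]

-- the body of A's 'for idx, gem in enumerate(gems)' loop; state = (answer, smallest, cart_key, matched)
def stepA (gems : List String) (buylist : PySem.Dict String Int)
    (st : List Int × Int × PySem.Dict String Int × List Int) (p : Int × String) :
    List Int × Int × PySem.Dict String Int × List Int :=
  let answer := st.1; let smallest := st.2.1; let cart_key := st.2.2.1; let matched := st.2.2.2
  let idx := p.1; let gem := p.2
  if (cart_key.get? gem).isNone then
    let cart_key := cart_key.insert gem 1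
    let answer := [PySem.List.pyGetD answer 0 0, idx]
    if cart_key.size = buylist.size ∧
        PySem.List.pyGetD answer 1 0 - PySem.List.pyGetD answer 0 0 < smallest then
      -- matched = deepcopy(answer); smallest = matched[1]-matched[0]; answer=[idx]; cart_key={}
      ([idx], PySem.List.pyGetD answer 1 0 - PySem.List.pyGetD answer 0 0,
        PySem.Dict.empty, answer)
    else (answer, smallest, cart_key, matched)
  else
    -- answer[1] = idx; answer = get_small_cart(answer, gems)
    -- (pySetD is total; Python's answer[1]=idx would raise only on a <2-element list, never reached)
    (getSmallCart (PySem.List.pySetD answer 1 idx) gems, smallest, cart_key, matched)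

def solution (gems : List String) : List Int :=
  let buylist := gems.foldl
    (fun (d : PySem.Dict String Int) gem => if (d.get? gem).isNone then d.insert gem 0 else d)
    PySem.Dict.empty
  let final := (PySem.List.enumerate gems 0).foldl (stepA gems buylist)
    ([0, 0], (gems.length : Int), PySem.Dict.empty, [])
  final.2.2.2.map (fun x => x + 1)

-- ===== PORT B =====

-- Source B's 'while gems[start] in gems[start+1:idx+1]: start += 1'.  The fuel argument only
-- totalizes the loop (gems.length steps always suffice at the call sites); the pyGetD
-- default is never used since start stays in range.
def shrinkAux (gems : List String) (idx : Int) : Nat → Int → Int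
  | 0, start => start
  | fuel + 1, start =>
    if PySem.List.pyGetD gems start "" ∈
        PySem.List.slice gems (some (start + 1)) (some (idx + 1)) then
      shrinkAux gems idx fuel (start + 1)
    else start

-- the body of Source B's loop; state = (start, cart, smallest, matched)
def stepB (gems : List String) (total : Nat)
    (st : Int × PySem.Set String × Int × List Int) (p : Int × String) :
    Int × PySem.Set String × Int × List Int :=
  let start := st.1; let cart := st.2.1; let smallest := st.2.2.1; let matched := st.2.2.2
  let idx := p.1; let gem := p.2
  if gem ∈ cart then
    (shrinkAux gems idx gems.length start, cart, smallest, matched)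
  else
    let cart := PySem.Set.add cart gem
    if cart.length = total ∧ idx - start < smallest then
      (idx, PySem.Set.empty, idx - start, [start, idx])
    else (start, cart, smallest, matched)

def solution_alt (gems : List String) : List Int :=
  let total := (PySem.Set.ofList gems).length
  let final := (PySem.List.enumerate gems 0).foldl (stepB gems total)
    (0, PySem.Set.empty, (gems.length : Int), [])
  final.2.2.2.map (fun x => x + 1)

-- ===== PRECONDITION & SPEC =====
def Spec_solution (gems : List String) (out : List Int) : Prop := out = solution_alt gems
instance (gems : List String) (out : List Int) : Decidable (Spec_solution gems out) := by unfold Spec_solution; infer_instance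

-- ===== CLAIM (what is proved, stated in full; the proofs are below) =====
def Claim_equal_solution : Prop := ∀ (gems : List String), Dom_solution gems → Spec_solution gems (solution gems)

-- ===== LEMMAS AND PROOFS =====

-- number of leading positions of l whose element reappears later in l
def greedy : List String → Nat
  | [] => 0
  | x :: xs => if x ∈ xs then greedy xs + 1 else 0

lemma greedy_lt_length (l : List String) (h : l ≠ []) : greedy l < l.length := by
  induction l with
  | nil => simp at h
  | cons x xs ih =>
    by_cases hx : x ∈ xs
    · have hne : xs ≠ [] := by rintro rfl; simp at hx
      simp [greedy, hx]; exact ih hne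
    · simp [greedy, hx]

lemma forall_mem_drop_iff (l : List String) (k : Nat) :
    (∀ x ∈ l, x ∈ l.drop k) ↔ (l = [] ∨ k ≤ greedy l) := by
  induction l generalizing k with
  | nil => simp
  | cons x xs ih =>
    cases k with
    | zero => simp
    | succ k =>
      simp only [List.drop_succ_cons, List.mem_cons]
      by_cases hx : x ∈ xs
      · constructor
        · intro h
          right
          have : ∀ y ∈ xs, y ∈ xs.drop k := fun y hy => h y (Or.inr hy)
          rcases (ih k).mp this with h' | h'
          · subst h'; simp at hx
          · simp [greedy, hx]; omega
        · intro h
          rcases h with h | h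
          · simp at h
          · simp only [greedy, hx, if_true] at h
            have hk : k ≤ greedy xs := by omega
            have := (ih k).mpr (Or.inr hk)
            intro y hy
            rcases hy with rfl | hy
            · exact this y hx
            · exact this y hy
      · constructor
        · intro h
          have hxd := h x (Or.inl rfl)
          have : x ∈ xs := List.mem_of_mem_drop hxd
          exact absurd this hx
        · intro h
          rcases h with h | h
          · simp at h
          · simp [greedy, hx] at h

lemma lenOfList_eq_card (l : List String) :
    (PySem.Set.ofList l).length = l.toFinset.card := by
  have hnd : (PySem.Set.ofList l).Nodup := PySem.Set.nodup_ofList l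
  have hmem : ∀ x, x ∈ PySem.Set.ofList l ↔ x ∈ l := fun x => PySem.Set.mem_ofList l x
  have : (PySem.Set.ofList l).toFinset = l.toFinset := by
    ext x; simp [hmem x]
  calc (PySem.Set.ofList l).length = (PySem.Set.ofList l).toFinset.card :=
        (List.toFinset_card_of_nodup hnd).symm
    _ = l.toFinset.card := by rw [this]

lemma card_drop_iff (l : List String) (k : Nat) :
    (l.drop k).toFinset.card = l.toFinset.card ↔ (∀ x ∈ l, x ∈ l.drop k) := by
  have hsub : (l.drop k).toFinset ⊆ l.toFinset := by
    intro x hx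
    simp only [List.mem_toFinset] at *
    exact List.mem_of_mem_drop hx
  constructor
  · intro h x hx
    have heq : (l.drop k).toFinset = l.toFinset :=
      Finset.eq_of_subset_of_card_le hsub (le_of_eq h.symm)
    have : x ∈ l.toFinset := List.mem_toFinset.mpr hx
    rw [← heq, List.mem_toFinset] at this
    exact this
  · intro h
    have : l.toFinset ⊆ (l.drop k).toFinset := by
      intro x hx
      simp only [List.mem_toFinset] at *
      exact h x hx
    exact le_antisymm (Finset.card_le_card hsub) (Finset.card_le_card this)

lemma foldl_all_true (l : List Int) (p : Int → Prop) [DecidablePred p]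
    (h : ∀ k ∈ l, p k) (a : Int) :
    l.foldl (fun acc k => if p k then k else acc) a = l.getLastD a := by
  induction l generalizing a with
  | nil => rfl
  | cons x xs ih =>
    simp only [List.foldl_cons, if_pos (h x (by simp))]
    rw [ih (fun k hk => h k (by simp [hk]))]
    cases xs <;> simp [List.getLastD]

lemma foldl_all_false (l : List Int) (p : Int → Prop) [DecidablePred p]
    (h : ∀ k ∈ l, ¬ p k) (a : Int) :
    l.foldl (fun acc k => if p k then k else acc) a = a := by
  induction l generalizing a with
  | nil => rfl
  | cons x xs ih =>
    simp only [List.foldl_cons, if_neg (h x (by simp))]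
    exact ih (fun k hk => h k (by simp [hk])) a

lemma foldl_lastTrue (n g : Int) (p : Int → Prop) [DecidablePred p]
    (hg0 : 0 ≤ g) (hgn : g < n)
    (hp : ∀ k, 0 ≤ k → k < n → (p k ↔ k ≤ g)) :
    (PySem.List.pyRange 0 n 1).foldl (fun acc k => if p k then k else acc) 0 = g := by
  rw [PySem.List.pyRange_one_append 0 (g + 1) n (by omega) (by omega), List.foldl_append]
  have h1 : (PySem.List.pyRange 0 (g + 1) 1).foldl (fun acc k => if p k then k else acc) 0 = g := by
    rw [foldl_all_true _ p (fun k hk => by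
      rw [PySem.List.mem_pyRange_one] at hk
      exact (hp k hk.1 (by omega)).mpr (by omega))]
    rw [PySem.List.pyRange_one_succ_right (by omega)]
    simp
  rw [h1]
  exact foldl_all_false _ p (fun k hk => by
    rw [PySem.List.mem_pyRange_one] at hk
    intro hpk
    have := (hp k (by omega) hk.2).mp hpk
    omega) g

-- A's get_small_cart on a window [s, j] shrinks the left end by greedy(window)
lemma getSmallCart_eq (gems : List String) (s j : Nat)
    (hsj : s ≤ j) (hj : j < gems.length) :
    getSmallCart [(s : Int), (j : Int)] gems
      = [(s : Int) + (greedy ((gems.drop s).take (j + 1 - s)) : Int), (j : Int)] := by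
  have h0 : PySem.List.pyGetD [(s : Int), (j : Int)] 0 0 = (s : Int) := by simp [pysem]
  have h1 : PySem.List.pyGetD [(s : Int), (j : Int)] 1 0 = (j : Int) := by simp [pysem]
  have hsl : PySem.List.slice gems (some (s : Int)) (some ((j : Int) + 1))
      = (gems.drop s).take (j + 1 - s) := by
    have h : ((j : Int) + 1) = ((j + 1 : Nat) : Int) := by push_cast; ring
    rw [h, PySem.List.slice_natCast]
  set w := (gems.drop s).take (j + 1 - s) with hwdef
  have hwlen : w.length = j + 1 - s := by
    simp [hwdef]; omega
  have hwne : w ≠ [] := by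
    intro h; rw [h] at hwlen; simp at hwlen; omega
  have hfold : (PySem.List.pyRange 0 (w.length : Int) 1).foldl
      (fun acc k =>
        if (PySem.Set.ofList (PySem.List.slice w (some k) none)).length
            = (PySem.Set.ofList w).length then k else acc) 0
      = (greedy w : Int) := by
    apply foldl_lastTrue
    · exact Int.natCast_nonneg _
    · exact_mod_cast greedy_lt_length w hwne
    · intro k hk0 hkn
      rw [PySem.List.slice_from w hk0, lenOfList_eq_card, lenOfList_eq_card,
        card_drop_iff, forall_mem_drop_iff]
      constructor
      · intro h
        rcases h with h | h
        · exact absurd h hwne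
        · omega
      · intro h
        right
        omega
  unfold getSmallCart
  simp only [h0, h1, hsl, hfold]

-- B's while-loop shrinks by the same amount
lemma shrinkAux_eq (gems : List String) (j : Nat) :
    ∀ (fuel s : Nat), s ≤ j → j < gems.length → j + 1 - s ≤ fuel →
    shrinkAux gems (j : Int) fuel (s : Int)
      = (s : Int) + (greedy ((gems.drop s).take (j + 1 - s)) : Int) := by
  intro fuel
  induction fuel with
  | zero => intro s hsj hj hf; omega
  | succ fuel ih =>
    intro s hsj hj hf
    have hs : s < gems.length := by omega
    have hget : PySem.List.pyGetD gems ((s : Nat) : Int) "" = gems[s] := by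
      rw [PySem.List.pyGetD_natCast, List.getD_eq_getElem?_getD, List.getElem?_eq_getElem hs,
        Option.getD_some]
    have hsl : PySem.List.slice gems (some ((s : Int) + 1)) (some ((j : Int) + 1))
        = (gems.drop (s + 1)).take (j - s) := by
      have h1 : ((s : Int) + 1) = ((s + 1 : Nat) : Int) := by push_cast; ring
      have h2 : ((j : Int) + 1) = ((j + 1 : Nat) : Int) := by push_cast; ring
      rw [h1, h2, PySem.List.slice_natCast]
      congr 1
      omega
    have hdrop : gems.drop s = gems[s] :: gems.drop (s + 1) := List.drop_eq_getElem_cons hs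
    have hw : (gems.drop s).take (j + 1 - s)
        = gems[s] :: (gems.drop (s + 1)).take (j - s) := by
      rw [hdrop]
      have : j + 1 - s = (j - s) + 1 := by omega
      rw [this, List.take_succ_cons]
    by_cases hm : gems[s] ∈ (gems.drop (s + 1)).take (j - s)
    · have htne : (gems.drop (s + 1)).take (j - s) ≠ [] := by
        intro h; rw [h] at hm; simp at hm
      have hsj' : s + 1 ≤ j := by
        by_contra hc
        have : j - s = 0 := by omega
        rw [this] at htne; simp at htne
      have hstep : shrinkAux gems (j : Int) (fuel + 1) (s : Int)
          = shrinkAux gems (j : Int) fuel ((s : Int) + 1) := by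
        simp only [shrinkAux]
        rw [hget, hsl, if_pos hm]
      rw [hstep]
      have hcast : ((s : Int) + 1) = ((s + 1 : Nat) : Int) := by push_cast; ring
      rw [hcast, ih (s + 1) hsj' hj (by omega)]
      rw [hw]
      have : j + 1 - (s + 1) = j - s := by omega
      rw [this]
      simp only [greedy, if_pos hm]
      push_cast
      ring
    · have hstep : shrinkAux gems (j : Int) (fuel + 1) (s : Int) = (s : Int) := by
        simp only [shrinkAux]
        rw [hget, hsl, if_neg hm]
      rw [hstep, hw]
      simp [greedy, hm]

-- a dict built over distinct keys with a constant value, as a list map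
lemma get?_mk_map_isNone_iff (s : List String) (c : Int) (x : String) :
    ((PySem.Dict.mk (s.map (fun g => (g, c)))).get? x).isNone ↔ x ∉ s := by
  rw [Option.isNone_iff_eq_none, PySem.Dict.get?_eq_none_iff_not_mem_keys]
  simp [PySem.Dict.keys_mk]

lemma insert_mk_map_fresh (s : List String) (c : Int) (x : String) (hx : x ∉ s) :
    (PySem.Dict.mk (s.map (fun g => (g, c)))).insert x c
      = PySem.Dict.mk ((s ++ [x]).map (fun g => (g, c))) := by
  apply PySem.Dict.ext
  rw [PySem.Dict.items_insert_of_not_contains]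
  · simp
  · rw [PySem.Dict.contains_eq_decide_mem_keys]
    simp [PySem.Dict.keys_mk, hx]

lemma buylist_fold (l : List String) :
    ∀ (s : List String), s.Nodup →
    l.foldl
      (fun (d : PySem.Dict String Int) gem => if (d.get? gem).isNone then d.insert gem 0 else d)
      (PySem.Dict.mk (s.map (fun g => (g, (0 : Int)))))
    = PySem.Dict.mk ((PySem.Set.update s l).map (fun g => (g, (0 : Int)))) := by
  induction l with
  | nil => intro s _; simp [PySem.Set.update]
  | cons x l ih =>
    intro s hnd
    rw [List.foldl_cons, PySem.Set.update_cons]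
    have hc := get?_mk_map_isNone_iff s 0 x
    by_cases hx : x ∈ s
    · rw [if_neg (fun h => (hc.mp h) hx), PySem.Set.add_of_mem hx]
      exact ih s hnd
    · rw [if_pos (hc.mpr hx), insert_mk_map_fresh s 0 x hx, PySem.Set.add_of_not_mem hx]
      refine ih (s ++ [x]) ?_
      have := PySem.Set.nodup_add (s := s) (x := x) hnd
      rwa [PySem.Set.add_of_not_mem hx] at this

-- the buylist preamble of A just counts distinct gems
lemma buylist_size (gems : List String) :
    (gems.foldl
      (fun (d : PySem.Dict String Int) gem => if (d.get? gem).isNone then d.insert gem 0 else d)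
      PySem.Dict.empty).size = (PySem.Set.ofList gems).length := by
  have h0 : (PySem.Dict.empty : PySem.Dict String Int)
      = PySem.Dict.mk (([] : List String).map (fun g => (g, (0 : Int)))) := rfl
  rw [h0, buylist_fold gems [] List.nodup_nil]
  have : PySem.Set.update ([] : List String) gems = PySem.Set.ofList gems :=
    PySem.Set.update_nil_left gems
  rw [this]
  simp [PySem.Dict.size]

-- the main simulation: both loops keep the same matched/smallest, with
-- cart_key = cart as a dict and answer's head = start
set_option maxHeartbeats 1600000 in
lemma loop_sim (gems : List String) (buylist : PySem.Dict String Int)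
    (hbs : buylist.size = (PySem.Set.ofList gems).length) :
    ∀ (rest : List String) (i : Nat), rest = gems.drop i →
    ∀ (answer matched : List Int) (smallest : Int) (cart : PySem.Set String) (start : Nat),
      cart.Nodup →
      PySem.List.pyGetD answer 0 0 = (start : Int) →
      (answer.length = 2 ∨ cart = []) →
      start ≤ i →
    ((PySem.List.enumerate rest (i : Int)).foldl (stepA gems buylist)
        (answer, smallest, PySem.Dict.mk (cart.map (fun g => (g, (1 : Int)))), matched)).2.2.2
      = ((PySem.List.enumerate rest (i : Int)).foldl (stepB gems (PySem.Set.ofList gems).length)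
        ((start : Int), cart, smallest, matched)).2.2.2 := by
  intro rest
  induction rest with
  | nil => intro i _ answer matched smallest cart start _ _ _ _; simp [PySem.List.enumerate]
  | cons g rest' ih =>
    intro i hrest answer matched smallest cart start hnd hans hlen hsi
    have hi : i < gems.length := by
      by_contra hc
      rw [List.drop_eq_nil_of_le (by omega)] at hrest
      exact (List.cons_ne_nil g rest') hrest
    have hdrop : gems.drop i = gems[i] :: gems.drop (i + 1) := List.drop_eq_getElem_cons hi
    rw [hdrop] at hrest
    have hrest' : rest' = gems.drop (i + 1) := by
      injection hrest
    rw [PySem.List.enumerate_cons, List.foldl_cons, List.foldl_cons]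
    have hcast1 : (i : Int) + 1 = ((i + 1 : Nat) : Int) := by push_cast; ring
    by_cases hmem : g ∈ cart
    · -- repeat branch
      have hcne : cart ≠ [] := by rintro rfl; simp at hmem
      have hl2 : answer.length = 2 := by
        rcases hlen with h | h
        · exact h
        · exact absurd h hcne
      obtain ⟨a0, a1, rfl⟩ := List.length_eq_two.mp hl2
      have ha0 : a0 = (start : Int) := by
        have := hans
        simp [pysem] at this
        omega
      subst ha0
      set w := (gems.drop start).take (i + 1 - start) with hwdef
      have hwlen : w.length = i + 1 - start := by simp [hwdef]; omega
      have hwne : w ≠ [] := by intro h; rw [h] at hwlen; simp at hwlen; omega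
      have hgl : greedy w < i + 1 - start := hwlen ▸ greedy_lt_length w hwne
      have hA : stepA gems buylist
          ([(start : Int), a1], smallest, PySem.Dict.mk (cart.map (fun g => (g, (1 : Int)))), matched)
          ((i : Int), g)
          = ([((start + greedy w : Nat) : Int), (i : Int)], smallest,
              PySem.Dict.mk (cart.map (fun g => (g, (1 : Int)))), matched) := by
        simp only [stepA]
        rw [if_neg (fun h => ((get?_mk_map_isNone_iff cart 1 g).mp h) hmem)]
        have hset : PySem.List.pySetD [(start : Int), a1] 1 (i : Int) = [(start : Int), (i : Int)] := by
          simp [pysem]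
        rw [hset, getSmallCart_eq gems start i hsi hi]
        rw [← hwdef]
        push_cast
        rfl
      have hB : stepB gems (PySem.Set.ofList gems).length
          ((start : Int), cart, smallest, matched) ((i : Int), g)
          = (((start + greedy w : Nat) : Int), cart, smallest, matched) := by
        simp only [stepB]
        rw [if_pos hmem, shrinkAux_eq gems i gems.length start hsi hi (by omega)]
        rw [← hwdef]
        push_cast
        rfl
      rw [hA, hB, hcast1]
      refine ih (i + 1) hrest' _ matched smallest cart (start + greedy w) hnd ?_ (Or.inl rfl)
        (by omega)
      exact PySem.List.pyGetD_zero_cons _ _ _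
    · -- new gem branch
      have hc1 := get?_mk_map_isNone_iff cart 1 g
      have hins := insert_mk_map_fresh cart 1 g hmem
      have hadd := PySem.Set.add_of_not_mem hmem
      have hnd' : (cart ++ [g]).Nodup := by
        have := PySem.Set.nodup_add (s := cart) (x := g) hnd
        rwa [hadd] at this
      have hsize : (PySem.Dict.mk ((cart ++ [g]).map (fun g => (g, (1 : Int))))).size
          = (cart ++ [g]).length := by simp [PySem.Dict.size]
      have hp0 : PySem.List.pyGetD [(start : Int), (i : Int)] 0 0 = (start : Int) := by
        simp [pysem]
      have hp1 : PySem.List.pyGetD [(start : Int), (i : Int)] 1 0 = (i : Int) := by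
        simp [pysem]
      by_cases hcond : (cart ++ [g]).length = (PySem.Set.ofList gems).length ∧
          (i : Int) - (start : Int) < smallest
      · have hA : stepA gems buylist
            (answer, smallest, PySem.Dict.mk (cart.map (fun g => (g, (1 : Int)))), matched)
            ((i : Int), g)
            = ([(i : Int)], (i : Int) - (start : Int), PySem.Dict.empty,
                [(start : Int), (i : Int)]) := by
          simp only [stepA]
          rw [if_pos (hc1.mpr hmem), hans, hins, hp0, hp1, hsize, hbs]
          rw [if_pos hcond]
        have hB : stepB gems (PySem.Set.ofList gems).length
            ((start : Int), cart, smallest, matched) ((i : Int), g)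
            = ((i : Int), PySem.Set.empty, (i : Int) - (start : Int), [(start : Int), (i : Int)]) := by
          simp only [stepB]
          rw [if_neg hmem, hadd, if_pos hcond]
        rw [hA, hB, hcast1]
        refine ih (i + 1) hrest' [(i : Int)] [(start : Int), (i : Int)]
          ((i : Int) - (start : Int)) [] i List.nodup_nil ?_ (Or.inr rfl) (by omega)
        exact PySem.List.pyGetD_zero_cons _ _ _
      · have hA : stepA gems buylist
            (answer, smallest, PySem.Dict.mk (cart.map (fun g => (g, (1 : Int)))), matched)
            ((i : Int), g)
            = ([(start : Int), (i : Int)], smallest,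
                PySem.Dict.mk ((cart ++ [g]).map (fun g => (g, (1 : Int)))), matched) := by
          simp only [stepA]
          rw [if_pos (hc1.mpr hmem), hans, hins, hp0, hp1, hsize, hbs]
          rw [if_neg hcond]
        have hB : stepB gems (PySem.Set.ofList gems).length
            ((start : Int), cart, smallest, matched) ((i : Int), g)
            = ((start : Int), cart ++ [g], smallest, matched) := by
          simp only [stepB]
          rw [if_neg hmem, hadd, if_neg hcond]
        rw [hA, hB, hcast1]
        exact ih (i + 1) hrest' _ matched smallest (cart ++ [g]) start hnd'
          hp0 (Or.inl rfl) (by omega)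

-- ===== VERDICT (by name: the statement is the Claim_ definition above) =====
theorem solution_spec : Claim_equal_solution := by
  intro gems _
  show solution gems = solution_alt gems
  unfold solution solution_alt
  have h := loop_sim gems
    (gems.foldl
      (fun (d : PySem.Dict String Int) gem => if (d.get? gem).isNone then d.insert gem 0 else d)
      PySem.Dict.empty)
    (buylist_size gems) gems 0 List.drop_zero.symm
    [0, 0] [] (gems.length : Int) [] 0 List.nodup_nil
    (by simp [pysem]) (Or.inl rfl) (Nat.le_refl 0)
  simp only [Nat.cast_zero] at h
  exact congrArg (List.map (fun x => x + 1)) h
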